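-- pv_equiv track=rewrite | github.com/AlexisGR117/AYPR | Programas/ceros y unos.py | m_lon_sub
-- ===== SOURCE A (Python) =====
-- def m_lon_sub(secuencia):
--     """Funcion que dada una secuencia de ceros y unos da
--     la longitud de la subsecuencia mas larga
--     (list1D) --> int"""
--     lon = 1
--     m_lon = 1
--     for i in range(len(secuencia)-1):
--         if int(secuencia[i]) == 1 and int(secuencia[i+1]) == 0:
--             lon = 1
--         else:
--             lon += 1
--             if lon > m_lon:
--                 m_lon = lon
--     return m_lon
-- ===== SOURCE B (Python) =====
-- def m_lon_sub(secuencia):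
--     """Funcion que dada una secuencia de ceros y unos da
--     la longitud de la subsecuencia mas larga
--     (list1D) --> int"""
--     n = len(secuencia)
--     # pass 1: collect the cut points (1 -> 0 transitions) as segment boundaries
--     bounds = [-1]
--     for i in range(n - 1):
--         if int(secuencia[i]) == 1 and int(secuencia[i + 1]) == 0:
--             bounds.append(i)
--     bounds.append(n - 1)
--     # pass 2: the answer is the largest gap between consecutive boundaries (min 1)
--     best = 1
--     for a, b in zip(bounds, bounds[1:]):
--         if b - a > best:
--             best = b - a
--     return best
-- ===== Notes on version B (the rewrite author's own statement) =====
-- stated objective: alternative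
-- what changed: Replaces the running-counter/running-max single pass by two passes: first collect the 1->0 transition indices as segment boundaries, then take the maximum gap between consecutive boundaries.
import Mathlib
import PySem

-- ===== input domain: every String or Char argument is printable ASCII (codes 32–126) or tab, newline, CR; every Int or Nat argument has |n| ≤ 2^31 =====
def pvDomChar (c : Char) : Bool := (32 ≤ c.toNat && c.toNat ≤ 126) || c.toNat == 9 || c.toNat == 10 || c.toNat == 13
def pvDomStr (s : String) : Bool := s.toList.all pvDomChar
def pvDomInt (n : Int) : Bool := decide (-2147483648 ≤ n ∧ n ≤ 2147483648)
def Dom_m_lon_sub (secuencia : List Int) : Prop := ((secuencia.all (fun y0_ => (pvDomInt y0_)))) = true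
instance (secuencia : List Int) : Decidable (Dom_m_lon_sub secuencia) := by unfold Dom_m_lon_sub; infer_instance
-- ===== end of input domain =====

-- B replaces A's running-counter single pass by two passes (collect 1->0 cut points, then max gap
-- between consecutive boundaries); alternative decomposition, same asymptotic cost.

-- the loop condition shared verbatim by both Pythons: a 1->0 transition at index i
-- (indices produced by the loops are always in range, so pyGetD is exact here)
def pvCut (secuencia : List Int) (i : Int) : Bool :=
  PySem.List.pyGetD secuencia i 0 == 1 && PySem.List.pyGetD secuencia (i + 1) 0 == 0

-- ===== PORT A =====
def m_lon_sub (secuencia : List Int) : Int :=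
  ((PySem.List.pyRange 0 ((secuencia.length : Int) - 1) 1).foldl
    (fun (st : Int × Int) i =>
      if pvCut secuencia i then (1, st.2)
      else (st.1 + 1, if st.1 + 1 > st.2 then st.1 + 1 else st.2))
    ((1 : Int), (1 : Int))).2

-- ===== PORT B =====
def m_lon_sub_alt (secuencia : List Int) : Int :=
  let n : Int := secuencia.length
  let bounds := ((PySem.List.pyRange 0 (n - 1) 1).foldl
    (fun acc i => if pvCut secuencia i then acc ++ [i] else acc) [(-1 : Int)]) ++ [n - 1]
  (bounds.zip bounds.tail).foldl
    (fun best p => if p.2 - p.1 > best then p.2 - p.1 else best) 1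

-- ===== PRECONDITION & SPEC =====
def Spec_m_lon_sub (secuencia : List Int) (out : Int) : Prop := out = m_lon_sub_alt secuencia
instance (secuencia : List Int) (out : Int) : Decidable (Spec_m_lon_sub secuencia out) := by unfold Spec_m_lon_sub; infer_instance

-- ===== CLAIM (what is proved, stated in full; the proofs are below) =====
def Claim_equal_m_lon_sub : Prop := ∀ (secuencia : List Int), Dom_m_lon_sub secuencia → Spec_m_lon_sub secuencia (m_lon_sub secuencia)

-- ===== LEMMAS AND PROOFS =====

-- B's second pass, abstracted over the boundary list
def pvGmax (bds : List Int) : Int :=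
  (bds.zip bds.tail).foldl (fun best p => if p.2 - p.1 > best then p.2 - p.1 else best) 1

theorem pvFoldl_max_ge (ps : List (Int × Int)) (best : Int) :
    best ≤ ps.foldl (fun best p => if p.2 - p.1 > best then p.2 - p.1 else best) best := by
  induction ps generalizing best with
  | nil => simp
  | cons p ps ih =>
    simp only [List.foldl_cons]
    refine le_trans ?_ (ih _)
    split_ifs <;> omega

theorem pvZip_tail_concat (xs : List Int) (y : Int) (h : xs ≠ []) :
    (xs ++ [y]).zip (xs ++ [y]).tail = xs.zip xs.tail ++ [(xs.getLastD 0, y)] := by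
  induction xs with
  | nil => simp at h
  | cons a xs ih =>
    cases xs with
    | nil => simp
    | cons b xs =>
      simp only [List.cons_append, List.zip_cons_cons, List.tail_cons]
      have := ih (by simp)
      simp only [List.cons_append, List.tail_cons] at this
      rw [this]
      simp [List.getLastD_eq_getLast?]

theorem pvGmax_concat (bds : List Int) (y : Int) (h : bds ≠ []) :
    pvGmax (bds ++ [y]) =
      if y - bds.getLastD 0 > pvGmax bds then y - bds.getLastD 0 else pvGmax bds := by
  unfold pvGmax
  rw [pvZip_tail_concat bds y h, List.foldl_append]
  simp

-- the main invariant of A's loop, stated against B's boundary structure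
theorem pvMain (sec : List Int) (b : Nat) :
    (((PySem.List.pyRange 0 (b : Int) 1).foldl
        (fun (st : Int × Int) i =>
          if pvCut sec i then (1, st.2)
          else (st.1 + 1, if st.1 + 1 > st.2 then st.1 + 1 else st.2))
        ((1 : Int), (1 : Int))).1
      = (b : Int) - (((-1 : Int) :: (PySem.List.pyRange 0 (b : Int) 1).filter (pvCut sec)).getLastD 0)) ∧
    (((PySem.List.pyRange 0 (b : Int) 1).foldl
        (fun (st : Int × Int) i =>
          if pvCut sec i then (1, st.2)
          else (st.1 + 1, if st.1 + 1 > st.2 then st.1 + 1 else st.2))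
        ((1 : Int), (1 : Int))).2
      = pvGmax ((((-1 : Int) :: (PySem.List.pyRange 0 (b : Int) 1).filter (pvCut sec))) ++ [(b : Int)])) := by
  induction b with
  | zero =>
    simp [pvGmax]
  | succ b ih =>
    obtain ⟨ih1, ih2⟩ := ih
    have hb : ((b + 1 : Nat) : Int) = (b : Int) + 1 := by push_cast; ring
    rw [hb, PySem.List.pyRange_one_succ_right (Int.natCast_nonneg b)]
    simp only [List.foldl_append, List.filter_append, List.foldl_cons, List.foldl_nil,
      List.filter_cons, List.filter_nil]
    by_cases hc : pvCut sec (b : Int) = true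
    · simp only [hc, if_true, ← List.cons_append, List.getLastD_concat]
      refine ⟨by omega, ?_⟩
      rw [ih2, pvGmax_concat _ ((b : Int) + 1) (by simp), List.getLastD_concat]
      have hge := pvFoldl_max_ge
        (((((-1 : Int) :: (PySem.List.pyRange 0 (b : Int) 1).filter (pvCut sec)) ++ [(b : Int)]).zip
          ((((-1 : Int) :: (PySem.List.pyRange 0 (b : Int) 1).filter (pvCut sec)) ++ [(b : Int)])).tail)) 1
      unfold pvGmax
      split_ifs <;> omega
    · simp only [hc, Bool.false_eq_true, if_false, List.append_nil]
      have hgl := pvGmax_concat ((-1 : Int) :: (PySem.List.pyRange 0 (b : Int) 1).filter (pvCut sec))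
        ((b : Int)) (by simp)
      have hgl' := pvGmax_concat ((-1 : Int) :: (PySem.List.pyRange 0 (b : Int) 1).filter (pvCut sec))
        ((b : Int) + 1) (by simp)
      refine ⟨by rw [ih1]; omega, ?_⟩
      rw [ih1, ih2, hgl, hgl']
      split_ifs <;> omega

-- ===== VERDICT (by name: the statement is the Claim_ definition above) =====
theorem m_lon_sub_spec : Claim_equal_m_lon_sub := by
  intro sec _
  unfold Spec_m_lon_sub
  cases sec with
  | nil => decide
  | cons x xs =>
    have hlen : (((x :: xs).length : Int)) - 1 = ((xs.length : Nat) : Int) := by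
      simp
    have h := (pvMain (x :: xs) xs.length).2
    unfold m_lon_sub m_lon_sub_alt
    simp only [hlen]
    rw [h, PySem.List.foldl_append_if_eq_filter]
    unfold pvGmax
    simp
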